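-- pv_equiv track=rewrite | github.com/JakubBachanek/MyProjectEuler | p80.py | sum_sqrt
-- ===== SOURCE A (Python) =====
-- MAX = 100
--
-- def sum_sqrt(n):
--     p = 0
--     t = []
--
--     while n > 9:
--         t.append(n % 100)
--         n //= 100
--
--     if n > 0:
--         t.append(n)
--
--     c = t[-1]
--     t = t[:-1]
--     root = []
--     dig = 0
--
--     while True:
--         x = 0
--
--         while True:
--             if (x+1)*(20*p + (x+1)) > c:
--                 break
--
--             x += 1
--
--         root.append(x)
--         dig += 1
--
--         if dig == MAX:
--             return sum(root)
--
--         r = c - x*(20*p + x)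
--         p = 10*p + x
--
--         if r == 0 and len(t) == 0:
--             return 0
--
--         if len(t) > 0:
--             c = r*100 + t[-1]
--             t = t[:-1]
--         else:
--             c = r*100
-- ===== SOURCE B (Python) =====
-- MAX = 100
--
-- def isqrt(n):
--     # recursive integer square root: isqrt(n) = 2*isqrt(n//4), corrected by 1
--     if n < 2:
--         return n
--     r = 2 * isqrt(n // 4)
--     return r + 1 if (r + 1) * (r + 1) <= n else r
--
-- def sum_sqrt(n):
--     s = isqrt(n)
--     if s * s == n:
--         return 0
--     d = len(str(s))
--     val = isqrt(n * 10 ** (2 * (MAX - d)))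
--     return sum(int(ch) for ch in str(val))
-- ===== Notes on version B (the rewrite author's own statement) =====
-- stated objective: alternative
-- what changed: A extracts the digits of sqrt(n) one by one with the schoolbook long-division square-root loop (base-hundred groups, trial-digit search, remainder carry); B computes a single recursive integer square root (isqrt of n from isqrt of its quotient by four) of n scaled by the right power of ten and sums the decimal digits of that one number, returning zero when n is a perfect square exactly as A does.
-- outside the precondition, e.g. on sum_sqrt(0): A raises IndexError, B returns 0
import Mathlib
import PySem

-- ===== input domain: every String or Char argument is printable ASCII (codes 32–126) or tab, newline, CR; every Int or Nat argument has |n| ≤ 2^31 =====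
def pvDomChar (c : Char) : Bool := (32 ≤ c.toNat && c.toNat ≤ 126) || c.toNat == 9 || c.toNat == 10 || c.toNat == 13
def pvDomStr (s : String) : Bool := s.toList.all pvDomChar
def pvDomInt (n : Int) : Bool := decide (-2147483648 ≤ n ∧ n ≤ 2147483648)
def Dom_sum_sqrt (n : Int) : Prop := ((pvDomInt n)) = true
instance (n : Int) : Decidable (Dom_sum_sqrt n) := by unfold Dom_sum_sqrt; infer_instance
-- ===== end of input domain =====

-- B replaces A's digit-by-digit long-division square root with a recursive integer
-- square root (isqrt(n) from isqrt(n//4)) applied once to n·10^(2·(100−d)), then a digit sum.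

-- ===== PORT A =====

-- while n > 9: t.append(n % 100); n //= 100
def sumSqrtGroups (n : Int) (t : List Int) : Int × List Int :=
  if h : 9 < n then
    sumSqrtGroups (PySem.Int.floordiv n 100) (t ++ [PySem.Int.mod n 100])
  else (n, t)
termination_by n.toNat
decreasing_by
  simp only [PySem.Int.floordiv]
  have e : Int.fdiv n 100 = n / 100 - if 0 ≤ (100:Int) ∨ (100:Int) ∣ n then 0 else 1 :=
    Int.fdiv_eq_ediv
  simp at e
  omega

-- inner 'while True' search for the next digit x; fuel (always sufficient on the
-- states A reaches, see lemma sumSqrtInner_eq) only makes the recursion total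
def sumSqrtInner (p c : Int) : Nat → Int → Int
  | 0, x => x
  | fuel+1, x => if (x+1)*(20*p + (x+1)) > c then x else sumSqrtInner p c fuel (x+1)

-- the main 'while True' loop; fuel = MAX - dig (the loop returns when dig reaches MAX,
-- so fuel is exactly the number of digits still to produce)
def sumSqrtLoop : Nat → Int → Int → List Int → List Int → Int
  | 0, _, _, _, root => root.sum          -- unreachable: the loop is entered with fuel ≥ 1
  | fuel+1, p, c, t, root =>
      let x := sumSqrtInner p c (c.toNat + 1) 0
      let root' := root ++ [x]
      if fuel = 0 then root'.sum          -- dig == MAX: return sum(root)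
      else
        let r := c - x*(20*p + x)
        let p' := 10*p + x
        if r = 0 ∧ t.length = 0 then 0
        else if 0 < t.length then
          -- c = r*100 + t[-1]; t = t[:-1]  (t nonempty here, so pyGet? is some)
          sumSqrtLoop fuel p' (r*100 + (PySem.List.pyGet? t (-1)).getD 0) t.dropLast root'
        else
          sumSqrtLoop fuel p' (r*100) t root'

def sum_sqrt (n : Int) : Int :=
  let (m, t0) := sumSqrtGroups n []
  let t1 := if 0 < m then t0 ++ [m] else t0
  match PySem.List.pyGet? t1 (-1) with
  | none => 0                             -- Python raises IndexError here (only for n ≤ 0, outside Pre_)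
  | some c => sumSqrtLoop 100 0 c t1.dropLast []    -- t = t[:-1]

-- ===== PORT B =====

def isqrtRec (n : Int) : Int :=
  if h : n < 2 then n
  else
    let r := 2 * isqrtRec (PySem.Int.floordiv n 4)
    if (r+1)*(r+1) ≤ n then r+1 else r
termination_by n.toNat
decreasing_by
  simp only [PySem.Int.floordiv]
  have e : Int.fdiv n 4 = n / 4 - if 0 ≤ (4:Int) ∨ (4:Int) ∣ n then 0 else 1 :=
    Int.fdiv_eq_ediv
  simp at e
  omega

def sum_sqrt_alt (n : Int) : Int :=
  let s := isqrtRec n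
  if s * s = n then 0
  else
    let d := PySem.Str.len (PySem.Int.toStr s)
    -- 10 ** (2*(MAX-d)): the Nat-valued exponent (2*(100-d)).toNat equals Python's
    -- 2*(100-d) whenever d ≤ 100 (always the case for the admitted inputs)
    let val := isqrtRec (n * 10 ^ (2 * (100 - d)).toNat)
    -- sum(int(ch) for ch in str(val)): int(ch) = ch.toNat - 48, exact on the decimal
    -- digit characters str produces for the nonnegative int val
    ((PySem.Int.toChars val).map (fun ch => (ch.toNat : Int) - 48)).sum

-- ===== PRECONDITION & SPEC =====
-- Pre_ excludes exactly n ≤ 0, where A raises IndexError (its group list is empty).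
def Pre_sum_sqrt (n : Int) : Prop := 1 ≤ n
instance (n : Int) : Decidable (Pre_sum_sqrt n) := by unfold Pre_sum_sqrt; infer_instance
def pvWitness_sum_sqrt : Int := 7

def Spec_sum_sqrt (n : Int) (out : Int) : Prop := out = sum_sqrt_alt n
instance (n : Int) (out : Int) : Decidable (Spec_sum_sqrt n out) := by unfold Spec_sum_sqrt; infer_instance

-- ===== CLAIM (what is proved, stated in full; the proofs are below) =====
def Claim_equal_sum_sqrt : Prop := ∀ (n : Int), Dom_sum_sqrt n → Pre_sum_sqrt n → Spec_sum_sqrt n (sum_sqrt n)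

-- ===== LEMMAS AND PROOFS =====

/-- Integer square root of an `Int` (0 on negatives), via `Nat.sqrt`. -/
def msqrt (m : Int) : Int := (Nat.sqrt m.toNat : Int)

/-- Value of a base-100 group list, least significant group first. -/
def groupVal : List Int → Int
  | [] => 0
  | g :: gs => g + 100 * groupVal gs

/-- Base-10 digit sum of an `Int` (of its `toNat`). -/
def dsum (m : Int) : Int := ((Nat.digits 10 m.toNat).sum : Int)

lemma msqrt_nonneg (m : Int) : 0 ≤ msqrt m := by
  simp [msqrt]

lemma msqrt_le (m : Int) (hm : 0 ≤ m) : msqrt m * msqrt m ≤ m := by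
  have c2 : (m.toNat : Int) = m := Int.toNat_of_nonneg hm
  have h := Nat.sqrt_le' m.toNat
  rw [pow_two] at h
  have h2 : ((Nat.sqrt m.toNat : Int)) * (Nat.sqrt m.toNat : Int) ≤ m := by
    rw [← c2]; exact_mod_cast h
  simpa [msqrt] using h2

lemma lt_msqrt_succ (m : Int) (hm : 0 ≤ m) : m < (msqrt m + 1) * (msqrt m + 1) := by
  have c2 : (m.toNat : Int) = m := Int.toNat_of_nonneg hm
  have h := Nat.lt_succ_sqrt' m.toNat
  rw [Nat.succ_eq_add_one, pow_two] at h
  have h2 : m < ((Nat.sqrt m.toNat : Int) + 1) * ((Nat.sqrt m.toNat : Int) + 1) := by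
    rw [← c2]; exact_mod_cast h
  simpa [msqrt] using h2

lemma msqrt_unique {m s : Int} (hs : 0 ≤ s) (h1 : s * s ≤ m) (h2 : m < (s+1)*(s+1)) :
    msqrt m = s := by
  have hm : 0 ≤ m := le_trans (mul_self_nonneg s) h1
  have c1 : (s.toNat : Int) = s := Int.toNat_of_nonneg hs
  have c2 : (m.toNat : Int) = m := Int.toNat_of_nonneg hm
  have e1 : s.toNat ≤ Nat.sqrt m.toNat := Nat.le_sqrt'.mpr (by nlinarith)
  have e2 : Nat.sqrt m.toNat < s.toNat + 1 := Nat.sqrt_lt'.mpr (by nlinarith)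
  simp only [msqrt]
  omega

/-- The inner search loop returns the largest digit candidate, provided enough fuel. -/
lemma sumSqrtInner_go (fuel : Nat) (p c x : Int) (hp : 0 ≤ p) (hx : 0 ≤ x)
    (hinv : x*(20*p + x) ≤ c) (hfuel : c < x + fuel) :
    0 ≤ sumSqrtInner p c fuel x ∧
    (sumSqrtInner p c fuel x)*(20*p + sumSqrtInner p c fuel x) ≤ c ∧
    c < (sumSqrtInner p c fuel x + 1)*(20*p + (sumSqrtInner p c fuel x + 1)) := by
  induction fuel generalizing x with
  | zero =>
    simp only [sumSqrtInner]
    have hcx : c < x := by simpa using hfuel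
    refine ⟨hx, hinv, ?_⟩
    nlinarith
  | succ fuel ih =>
    simp only [sumSqrtInner]
    split_ifs with hgt
    · exact ⟨hx, hinv, hgt⟩
    · push_neg at hgt
      exact ih (x+1) (by omega) hgt (by push_cast; push_cast at hfuel; omega)

/-- The digit produced from state (p, c) is msqrt(100 p² + c) − 10 p. -/
lemma sumSqrtInner_eq (p c : Int) (hp : 0 ≤ p) (hc : 0 ≤ c) :
    sumSqrtInner p c (c.toNat + 1) 0 = msqrt (100*p^2 + c) - 10*p := by
  obtain ⟨hy0, hy1, hy2⟩ := sumSqrtInner_go (c.toNat + 1) p c 0 hp le_rfl (by nlinarith)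
    (by push_cast; omega)
  set y := sumSqrtInner p c (c.toNat + 1) 0 with hy
  have := msqrt_unique (m := 100*p^2 + c) (s := 10*p + y) (by nlinarith)
    (by nlinarith) (by nlinarith)
  omega

lemma dsum_ten (a x : Int) (ha : 0 ≤ a) (hx : 0 ≤ x) (hx10 : x < 10) :
    dsum (10*a + x) = dsum a + x := by
  by_cases h0 : a = 0 ∧ x = 0
  · obtain ⟨rfl, rfl⟩ := h0; simp [dsum]
  · have hpos : 0 < (10*a + x).toNat := by omega
    have hsplit : (10*a + x).toNat = 10 * a.toNat + x.toNat := by omega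
    have := Nat.digits_def' (b := 10) (by norm_num) hpos
    rw [dsum, this, hsplit]
    have m1 : (10 * a.toNat + x.toNat) % 10 = x.toNat := by omega
    have m2 : (10 * a.toNat + x.toNat) / 10 = a.toNat := by omega
    rw [m1, m2]
    simp [dsum]
    omega

lemma groupVal_nonneg (t : List Int) (h : ∀ g ∈ t, 0 ≤ g ∧ g < 100) : 0 ≤ groupVal t := by
  induction t with
  | nil => simp [groupVal]
  | cons g gs ih =>
    have h1 := h g (by simp)
    have h2 := ih (fun x hx => h x (by simp [hx]))
    simp only [groupVal]
    nlinarith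

lemma groupVal_append (t : List Int) (g : Int) :
    groupVal (t ++ [g]) = groupVal t + 100^(t.length) * g := by
  induction t with
  | nil => simp [groupVal]
  | cons a gs ih => simp only [List.cons_append, groupVal, ih, List.length_cons]; ring

lemma groupVal_lt (t : List Int) (h : ∀ g ∈ t, 0 ≤ g ∧ g < 100) :
    groupVal t < 100^(t.length) := by
  induction t with
  | nil => simp [groupVal]
  | cons g gs ih =>
    have h1 := h g (by simp)
    have h2 := ih (fun x hx => h x (by simp [hx]))
    simp only [groupVal, List.length_cons, pow_succ]
    nlinarith

/-- squares are preserved by multiplying with 100 (both directions). -/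
lemma sq_iff_sq_hundred (m : Nat) :
    (Nat.sqrt (100*m) * Nat.sqrt (100*m) = 100*m) ↔ (Nat.sqrt m * Nat.sqrt m = m) := by
  rw [← Nat.exists_mul_self, ← Nat.exists_mul_self]
  constructor
  · rintro ⟨s, hs⟩
    have h2 : (2:Nat) ∣ s := Nat.Prime.dvd_of_dvd_pow (n := 2) Nat.prime_two
      (by rw [pow_two, hs]; exact ⟨50*m, by ring⟩)
    have h5 : (5:Nat) ∣ s := Nat.Prime.dvd_of_dvd_pow (n := 2) Nat.prime_five
      (by rw [pow_two, hs]; exact ⟨20*m, by ring⟩)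
    have h10 : (10:Nat) ∣ s := Nat.Coprime.mul_dvd_of_dvd_of_dvd (by norm_num) h2 h5
    obtain ⟨k, rfl⟩ := h10
    exact ⟨k, by nlinarith⟩
  · rintro ⟨s, hs⟩
    exact ⟨10*s, by rw [← hs]; ring⟩

lemma pyGet_last (t : List Int) (g : Int) : PySem.List.pyGet? (t ++ [g]) (-1) = some g := by
  simp [PySem.List.pyGet?, PySem.List.pyIdx?]

/-- square-ness transfer under multiplication by 100, `Int` version. -/
lemma int_sq_hundred (M : Int) (hM : 0 ≤ M) :
    (msqrt (100*M) * msqrt (100*M) = 100*M) ↔ (msqrt M * msqrt M = M) := by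
  have h : (100*M).toNat = 100 * M.toNat := by omega
  have hN := sq_iff_sq_hundred M.toNat
  simp only [msqrt, h]
  constructor
  · intro hI
    have : Nat.sqrt (100*M.toNat) * Nat.sqrt (100*M.toNat) = 100 * M.toNat := by
      omega
    have := hN.mp this
    omega
  · intro hI
    have : Nat.sqrt M.toNat * Nat.sqrt M.toNat = M.toNat := by omega
    have := hN.mpr this
    omega

/-- Facts about one digit step from state (p, c). -/
lemma digit_step (p c : Int) (hp : 0 ≤ p) (hc : 0 ≤ c) (hb : c ≤ 200*p + 99) :
    10*p ≤ msqrt (100*p^2 + c) ∧ msqrt (100*p^2 + c) < 10*p + 10 ∧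
    dsum (msqrt (100*p^2 + c)) = dsum p + (msqrt (100*p^2 + c) - 10*p) ∧
    (100*p^2 + c) - msqrt (100*p^2 + c) * msqrt (100*p^2 + c) ≤ 2 * msqrt (100*p^2 + c) := by
  have hM : 0 ≤ 100*p^2 + c := by nlinarith
  have hle := msqrt_le _ hM
  have hlt := lt_msqrt_succ _ hM
  have hq0 := msqrt_nonneg (100*p^2 + c)
  set q := msqrt (100*p^2 + c) with hq
  have h1 : 10*p ≤ q := by nlinarith
  have h2 : q < 10*p + 10 := by nlinarith
  refine ⟨h1, h2, ?_, by nlinarith⟩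
  have := dsum_ten p (q - 10*p) hp (by omega) (by omega)
  have e : 10*p + (q - 10*p) = q := by ring
  rw [e] at this
  omega

/-- Tail run (no groups left) when the current value is a perfect square: returns 0. -/
lemma sumSqrtLoop_tail_sq (fuel : Nat) (p c : Int) (root : List Int)
    (h2 : 2 ≤ fuel) (hp : 0 ≤ p) (hc : 0 ≤ c)
    (hsq : msqrt (100*p^2 + c) * msqrt (100*p^2 + c) = 100*p^2 + c) :
    sumSqrtLoop fuel p c [] root = 0 := by
  obtain ⟨f, rfl⟩ : ∃ f, fuel = f + 1 := ⟨fuel - 1, by omega⟩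
  simp only [sumSqrtLoop]
  rw [sumSqrtInner_eq p c hp hc]
  have hf : ¬ (f = 0) := by omega
  have hr : c - (msqrt (100*p^2 + c) - 10*p)*(20*p + (msqrt (100*p^2 + c) - 10*p)) = 0 := by
    nlinarith [hsq]
  simp [hf, hr]

/-- Tail run (no groups left), not a perfect square: produces the remaining digits. -/
lemma sumSqrtLoop_tail_nonsq (fuel : Nat) (p c : Int) (root : List Int)
    (h1 : 1 ≤ fuel) (hp : 0 ≤ p) (hc : 0 ≤ c) (hb : c ≤ 200*p + 99)
    (hnsq : msqrt (100*p^2 + c) * msqrt (100*p^2 + c) ≠ 100*p^2 + c) :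
    sumSqrtLoop fuel p c [] root
      = root.sum + dsum (msqrt ((100*p^2 + c) * 100^(fuel - 1))) - dsum p := by
  induction fuel generalizing p c root with
  | zero => omega
  | succ f ih =>
    have hM : 0 ≤ 100*p^2 + c := by nlinarith
    obtain ⟨h1, h2, h3, h4⟩ := digit_step p c hp hc hb
    have hle := msqrt_le _ hM
    have hq0 := msqrt_nonneg (100*p^2 + c)
    simp only [sumSqrtLoop]
    rw [sumSqrtInner_eq p c hp hc]
    set q := msqrt (100*p^2 + c) with hq
    by_cases hf : f = 0
    · subst hf
      simp only [reduceIte]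
      rw [show ((0:Nat)+1-1) = 0 from rfl, pow_zero, mul_one, ← hq]
      simp [List.sum_append]
      omega
    · simp only [hf, if_false]
      have hr0 : 0 ≤ c - (q - 10*p)*(20*p + (q - 10*p)) := by nlinarith
      have hrq : c - (q - 10*p)*(20*p + (q - 10*p)) = (100*p^2 + c) - q*q := by ring
      have hrne : ¬ (c - (q - 10*p)*(20*p + (q - 10*p)) = 0 ∧ (List.length ([] : List Int)) = 0) := by
        simp only [List.length_nil, and_true]
        intro h0
        exact hnsq (by omega)
      rw [if_neg hrne]
      simp only [List.length_nil, lt_irrefl, if_false, reduceIte]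
      set r := c - (q - 10*p)*(20*p + (q - 10*p)) with hrdef
      have hM' : 100*(10*p + (q - 10*p))^2 + r*100 = 100*(100*p^2 + c) := by ring
      have step := ih (10*p + (q - 10*p)) (r*100) (root ++ [q - 10*p]) (by omega)
        (by omega) (by omega) (by nlinarith)
        (by
          have e : 100*(10*p + (q - 10*p))^2 + r*100 = 100*(100*p^2 + c) := by ring
          rw [e]
          have := (int_sq_hundred (100*p^2 + c) hM).not
          simpa [hq] using fun hx => hnsq ((int_sq_hundred (100*p^2 + c) hM).mp (by
            have e2 : (100:Int)*(100*p^2+c) = 100*(100*p^2+c) := rfl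
            rw [← e] at hx ⊢
            exact hx)))
      have e3 : 10*p + (q - 10*p) = q := by ring
      rw [e3] at step ⊢
      rw [step]
      have e4 : (100*q^2 + r*100) * 100^(f - 1) = (100*p^2 + c) * 100^(f+1-1) := by
        have : (100:Int)*q^2 + r*100 = 100*(100*p^2 + c) := by rw [hrq]; ring
        rw [this]
        obtain ⟨g, rfl⟩ : ∃ g, f = g + 1 := ⟨f - 1, by omega⟩
        simp [pow_succ]
        ring
      rw [e4]
      simp [List.sum_append]
      omega

/-- Main loop characterisation while consuming the group list. -/
lemma sumSqrtLoop_main (t : List Int) (fuel : Nat) (p c : Int) (root : List Int)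
    (hfuel : t.length + 2 ≤ fuel) (hp : 0 ≤ p) (hc : 0 ≤ c) (hb : c ≤ 200*p + 99)
    (ht : ∀ g ∈ t, 0 ≤ g ∧ g < 100) :
    sumSqrtLoop fuel p c t root =
      (if msqrt (100^(t.length) * (100*p^2 + c) + groupVal t) *
            msqrt (100^(t.length) * (100*p^2 + c) + groupVal t)
          = 100^(t.length) * (100*p^2 + c) + groupVal t then 0
       else root.sum + dsum (msqrt ((100^(t.length) * (100*p^2 + c) + groupVal t)
              * 100^(fuel - 1 - t.length))) - dsum p) := by
  induction t using List.reverseRecOn generalizing fuel p c root with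
  | nil =>
    simp only [List.length_nil, pow_zero, one_mul, groupVal, add_zero, Nat.sub_zero]
    by_cases hsq : msqrt (100*p^2 + c) * msqrt (100*p^2 + c) = 100*p^2 + c
    · rw [if_pos hsq]
      exact sumSqrtLoop_tail_sq fuel p c root (by omega) hp hc hsq
    · rw [if_neg hsq]
      exact sumSqrtLoop_tail_nonsq fuel p c root (by omega) hp hc hb hsq
  | append_singleton ys g ihy =>
    have hg := ht g (by simp)
    have hys : ∀ x ∈ ys, 0 ≤ x ∧ x < 100 := fun x hx => ht x (by simp [hx])
    obtain ⟨f, rfl⟩ : ∃ f, fuel = f + 1 := ⟨fuel - 1, by omega⟩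
    have hlen : (ys ++ [g]).length = ys.length + 1 := by simp
    have hM : 0 ≤ 100*p^2 + c := by nlinarith
    obtain ⟨h1, h2, h3, h4⟩ := digit_step p c hp hc hb
    have hle := msqrt_le _ hM
    have hq0 := msqrt_nonneg (100*p^2 + c)
    simp only [sumSqrtLoop]
    rw [sumSqrtInner_eq p c hp hc]
    set q := msqrt (100*p^2 + c) with hq
    have hf : ¬ (f = 0) := by omega
    rw [if_neg hf]
    have hne : ¬ (c - (q - 10*p)*(20*p + (q - 10*p)) = 0 ∧ (ys ++ [g]).length = 0) := by
      simp [hlen]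
    rw [if_neg hne, if_pos (by simp : 0 < (ys ++ [g]).length)]
    rw [pyGet_last, List.dropLast_concat]
    simp only [Option.getD_some]
    set r := c - (q - 10*p)*(20*p + (q - 10*p)) with hrdef
    have hrq : r = (100*p^2 + c) - q*q := by rw [hrdef]; ring
    have hr0 : 0 ≤ r := by nlinarith
    have step := ihy f (10*p + (q - 10*p)) (r*100 + g) (root ++ [q - 10*p])
      (by simp at hfuel; omega) (by omega) (by nlinarith) (by nlinarith) hys
    have e3 : 10*p + (q - 10*p) = q := by ring
    rw [e3] at step ⊢
    rw [step]
    have eM : 100^(ys.length) * (100*q^2 + (r*100 + g)) + groupVal ys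
        = 100^((ys ++ [g]).length) * (100*p^2 + c) + groupVal (ys ++ [g]) := by
      rw [groupVal_append, hlen, hrq, pow_succ]
      ring
    rw [eM]
    have eexp : f - 1 - ys.length = f + 1 - 1 - (ys ++ [g]).length := by
      rw [hlen]; omega
    rw [eexp]
    by_cases hsq : msqrt (100^((ys ++ [g]).length) * (100*p^2 + c) + groupVal (ys ++ [g])) *
        msqrt (100^((ys ++ [g]).length) * (100*p^2 + c) + groupVal (ys ++ [g]))
        = 100^((ys ++ [g]).length) * (100*p^2 + c) + groupVal (ys ++ [g])
    · rw [if_pos hsq, if_pos hsq]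
    · rw [if_neg hsq, if_neg hsq]
      simp [List.sum_append]
      omega

/-- The group-building while loop produces the base-100 digits of n. -/
lemma sumSqrtGroups_spec (n : Int) (acc : List Int) (hn : 0 ≤ n) :
    ∃ m e, sumSqrtGroups n acc = (m, acc ++ e) ∧ 0 ≤ m ∧ m ≤ 9 ∧
      (∀ g ∈ e, 0 ≤ g ∧ g < 100) ∧ groupVal e + 100^(e.length) * m = n ∧
      (n ≤ 9 → e = []) ∧
      ((m = 0 ∧ 1 ≤ n) → ∃ e' a, e = e' ++ [a] ∧ 10 ≤ a ∧ a ≤ 99) := by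
  induction hk : n.toNat using Nat.strong_induction_on generalizing n acc with
  | _ k ih =>
  rw [sumSqrtGroups]
  split_ifs with h9
  · -- n > 9 : recurse on n // 100
    have efd : Int.fdiv n 100 = n / 100 := by
      have e : Int.fdiv n 100 = n / 100 - if 0 ≤ (100:Int) ∨ (100:Int) ∣ n then 0 else 1 :=
        Int.fdiv_eq_ediv
      simp at e; exact e
    have efm : Int.fmod n 100 = n % 100 := by
      have e : Int.fmod n 100 = n % 100 + if 0 ≤ (100:Int) ∨ (100:Int) ∣ n then 0 else 100 :=
        Int.fmod_eq_emod
      simp at e; exact e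
    simp only [PySem.Int.floordiv, PySem.Int.mod, efd, efm]
    obtain ⟨m, e2, heq, hm0, hm9, helems, hval, hsmall, hlead⟩ :=
      ih (n / 100).toNat (by omega) (n / 100) (acc ++ [n % 100]) (by omega) rfl
    refine ⟨m, (n % 100) :: e2, by simpa using heq, hm0, hm9, ?_, ?_, by omega, ?_⟩
    · intro g hg
      rcases List.mem_cons.mp hg with h | h
      · omega
      · exact helems g h
    · simp only [groupVal, List.length_cons, pow_succ]
      have : n = 100 * (n / 100) + n % 100 := by omega
      nlinarith [hval]
    · rintro ⟨rfl, -⟩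
      by_cases hz : 1 ≤ n / 100
      · obtain ⟨e', a, rfl, ha1, ha2⟩ := hlead ⟨rfl, hz⟩
        exact ⟨(n % 100) :: e', a, by simp, ha1, ha2⟩
      · have hn2 : n / 100 = 0 := by omega
        have he2 : e2 = [] := hsmall (by omega)
        subst he2
        refine ⟨[], n % 100, by simp, by omega, by omega⟩
  · exact ⟨n, [], by simp, hn, by omega, by simp, by simp [groupVal], by simp, by omega⟩

lemma isqrtRec_eq (n : Int) (hn : 0 ≤ n) : isqrtRec n = msqrt n := by
  induction hk : n.toNat using Nat.strong_induction_on generalizing n with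
  | _ k ih =>
  rw [isqrtRec]
  split_ifs with h2
  · have : n = 0 ∨ n = 1 := by omega
    rcases this with rfl | rfl
    · simp [msqrt]
    · simp [msqrt]
  · have efd : Int.fdiv n 4 = n / 4 := by
      have e : Int.fdiv n 4 = n / 4 - if 0 ≤ (4:Int) ∨ (4:Int) ∣ n then 0 else 1 :=
        Int.fdiv_eq_ediv
      simp at e; exact e
    simp only [PySem.Int.floordiv, efd]
    have hrec : isqrtRec (n / 4) = msqrt (n / 4) :=
      ih (n / 4).toNat (by omega) (n / 4) (by omega) rfl
    rw [hrec]
    have hd0 : 0 ≤ n / 4 := by omega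
    have hle := msqrt_le _ hd0
    have hlt := lt_msqrt_succ _ hd0
    have hu0 := msqrt_nonneg (n / 4)
    have hdiv : 4*(n/4) ≤ n ∧ n < 4*(n/4) + 4 := by omega
    split_ifs with hcorr
    · exact (msqrt_unique (by omega) (by nlinarith) (by nlinarith)).symm
    · push_neg at hcorr
      exact (msqrt_unique (by omega) (by nlinarith) (by nlinarith)).symm

/-- digit characters decode back to their value. -/
lemma digitChar_decode (u : Nat) (hu : u < 10) : ((Nat.digitChar u).toNat : Int) - 48 = u := by
  interval_cases u <;> decide

lemma natToDigits_sum (k : Nat) :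
    ((Nat.toDigits 10 k).map (fun ch => (ch.toNat : Int) - 48)).sum
      = ((Nat.digits 10 k).sum : Int) := by
  induction k using Nat.strong_induction_on with
  | _ k ih =>
  by_cases hk : k < 10
  · rw [Nat.toDigits_of_lt_base hk]
    rcases Nat.eq_zero_or_pos k with rfl | hpos
    · simpa using digitChar_decode 0 (by norm_num)
    · rw [Nat.digits_def' (by norm_num : (1:Nat) < 10) hpos]
      have hz : k / 10 = 0 := by omega
      have hmod : k % 10 = k := by omega
      simp [hz, hmod, digitChar_decode k hk]
  · rw [Nat.toDigits_of_base_le (by norm_num) (by omega)]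
    rw [Nat.digits_def' (by norm_num : (1:Nat) < 10) (by omega)]
    have := ih (k / 10) (by omega)
    simp only [List.map_append, List.sum_append, List.map_cons, List.map_nil,
      List.sum_cons, List.sum_nil, this, digitChar_decode (k % 10) (by omega)]
    push_cast
    ring

lemma natToDigits_len (k : Nat) (hk : 1 ≤ k) :
    (Nat.toDigits 10 k).length = (Nat.digits 10 k).length := by
  induction k using Nat.strong_induction_on with
  | _ k ih =>
  by_cases h10 : k < 10
  · rw [Nat.toDigits_of_lt_base h10,
      Nat.digits_def' (by norm_num : (1:Nat) < 10) (by omega)]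
    have hz : k / 10 = 0 := by omega
    simp [hz]
  · rw [Nat.toDigits_of_base_le (by norm_num) (by omega),
      Nat.digits_def' (by norm_num : (1:Nat) < 10) (by omega)]
    have := ih (k / 10) (by omega) (by omega)
    simp [this]

lemma toChars_digitSum (m : Int) (hm : 0 ≤ m) :
    ((PySem.Int.toChars m).map (fun ch => (ch.toNat : Int) - 48)).sum = dsum m := by
  rw [PySem.Int.toChars, if_neg (by omega), dsum]
  exact natToDigits_sum m.toNat

lemma toStr_len (m : Int) (hm : 1 ≤ m) :
    PySem.Str.len (PySem.Int.toStr m) = ((Nat.digits 10 m.toNat).length : Int) := by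
  simp only [PySem.Str.len, PySem.Int.toList_toStr, PySem.Int.toChars, if_neg
    (show ¬ m < 0 by omega), natToDigits_len m.toNat (by omega)]

-- ===== VERDICT (by name: the statement is the Claim_ definition above) =====
/-- Final assembly: the 100-digit loop started on the groups of n equals B's value. -/
lemma final_assembly (n : Int) (ys : List Int) (c0 : Int)
    (hn31 : n ≤ 2147483648)
    (hys : ∀ g ∈ ys, 0 ≤ g ∧ g < 100) (hc1 : 1 ≤ c0) (hc99 : c0 ≤ 99)
    (hval : groupVal ys + 100^(ys.length) * c0 = n) :
    sumSqrtLoop 100 0 c0 ys [] = sum_sqrt_alt n := by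
  have hgv := groupVal_nonneg ys hys
  have hgl := groupVal_lt ys hys
  have hpow0 : (0:Int) < 100^(ys.length) := pow_pos (by norm_num) _
  have hn1 : 1 ≤ n := by nlinarith
  have hlow : 100^(ys.length) ≤ n := by nlinarith
  have hhigh : n < 100^(ys.length+1) := by rw [pow_succ]; nlinarith
  have hlen4 : ys.length ≤ 4 := by
    by_contra hcon
    have h5 : (100:Int)^5 ≤ 100^(ys.length) :=
      pow_le_pow_right₀ (by norm_num) (by omega)
    norm_num at h5
    omega
  rw [sumSqrtLoop_main ys 100 0 c0 [] (by omega) le_rfl (by omega) (by omega) hys]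
  have eM : 100^(ys.length) * (100*0^2 + c0) + groupVal ys = n := by rw [← hval]; ring
  rw [eM]
  rw [sum_sqrt_alt]
  rw [isqrtRec_eq n (by omega)]
  have hle := msqrt_le n (by omega)
  have hlt := lt_msqrt_succ n (by omega)
  have hs0 := msqrt_nonneg n
  set s := msqrt n with hs
  have hs1 : 1 ≤ s := by nlinarith
  have e10 : (10:Int)^(ys.length) * 10^(ys.length) = 100^(ys.length) := by
    rw [← mul_pow]; norm_num
  have e10' : (10:Int)^(ys.length+1) * 10^(ys.length+1) = 100^(ys.length+1) := by
    rw [← mul_pow]; norm_num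
  have h10p : (0:Int) < 10^(ys.length) := pow_pos (by norm_num) _
  have h10p' : (0:Int) < 10^(ys.length+1) := pow_pos (by norm_num) _
  have hsl : 10^(ys.length) ≤ s := by nlinarith
  have hsh : s < 10^(ys.length+1) := by nlinarith
  have hslN : (10:Nat)^(ys.length) ≤ s.toNat := by
    have c1 : ((10^(ys.length) : Nat) : Int) = (10:Int)^(ys.length) := by push_cast; ring
    omega
  have hshN : s.toNat < (10:Nat)^(ys.length+1) := by
    have c1 : ((10^(ys.length+1) : Nat) : Int) = (10:Int)^(ys.length+1) := by push_cast; ring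
    omega
  have hd : PySem.Str.len (PySem.Int.toStr s) = ((ys.length + 1 : Nat) : Int) := by
    rw [toStr_len s hs1]
    congr 1
    rw [Nat.digits_len 10 s.toNat (by norm_num) (by omega),
      Nat.log_eq_of_pow_le_of_lt_pow hslN hshN]
  rw [hd]
  by_cases hsq : s * s = n
  · rw [if_pos hsq, if_pos hsq]
  · rw [if_neg hsq, if_neg hsq]
    simp only []
    have hE : (2 * (100 - ((ys.length + 1 : Nat) : Int))).toNat = 2*(99 - ys.length) := by omega
    rw [hE]
    have hargnn : (0:Int) ≤ n * 10 ^ (2*(99 - ys.length)) :=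
      mul_nonneg (by omega) (by positivity)
    rw [isqrtRec_eq _ hargnn, toChars_digitSum _ (msqrt_nonneg _)]
    have hexp : 100 - 1 - ys.length = 99 - ys.length := by omega
    rw [hexp]
    have hpow : (10:Int) ^ (2*(99 - ys.length)) = 100 ^ (99 - ys.length) := by
      rw [pow_mul]; norm_num
    rw [hpow]
    have hd0 : dsum 0 = 0 := by simp [dsum]
    simp [hd0]

theorem sum_sqrt_spec : Claim_equal_sum_sqrt := by
  intro n hdom hpre
  unfold Pre_sum_sqrt at hpre
  have hn31 : n ≤ 2147483648 := by
    unfold Dom_sum_sqrt pvDomInt at hdom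
    simp at hdom
    omega
  unfold Spec_sum_sqrt
  obtain ⟨m, e, heq, hm0, hm9, helems, hval, hsmall, hlead⟩ :=
    sumSqrtGroups_spec n [] (by omega)
  simp only [List.nil_append] at heq
  rw [sum_sqrt, heq]
  by_cases hm : 0 < m
  · simp only [if_pos hm]
    rw [pyGet_last, List.dropLast_concat]
    exact final_assembly n e m hn31 helems (by omega) (by omega) hval
  · simp only [if_neg hm]
    have hm' : m = 0 := by omega
    obtain ⟨e', a, rfl, ha1, ha2⟩ := hlead ⟨hm', hpre⟩
    rw [pyGet_last, List.dropLast_concat]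
    apply final_assembly n e' a hn31 (fun g hg => helems g (by simp [hg])) (by omega) (by omega)
    have := groupVal_append e' a
    rw [hm'] at hval
    simp at hval
    omega
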